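-- pv_equiv track=rewrite | github.com/DashaBulanova/leetcodeChallenge | backspaceStringCompare/solution.py | get_next_significant_index
-- ===== SOURCE A (Python) =====
-- def get_next_significant_index(origin: str, current_index: int) -> int:
--     if current_index == 0:
--         return -1
--
--     backspace = 0
--
--     for i in range(current_index-1, -1, -1):
--         if origin[i] == '#':
--             backspace += 1
--         elif backspace > 0:
--             backspace -= 1
--         else:
--             return i
--
--     return -1
-- ===== SOURCE B (Python) =====
-- def get_next_significant_index(origin: str, current_index: int) -> int:
--     stack = []
--     for i in range(current_index):
--         if origin[i] == '#':
--             if stack: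
--                 stack.pop()
--         else:
--             stack.append(i)
--     return stack[-1] if stack else -1
-- ===== Notes on version B (the rewrite author's own statement) =====
-- stated objective: idiomatic
-- what changed: Replaces A's backward scan with a scalar pending-backspace counter and early return by a forward pass that builds the stack of surviving character indices and returns its top.
import Mathlib
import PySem

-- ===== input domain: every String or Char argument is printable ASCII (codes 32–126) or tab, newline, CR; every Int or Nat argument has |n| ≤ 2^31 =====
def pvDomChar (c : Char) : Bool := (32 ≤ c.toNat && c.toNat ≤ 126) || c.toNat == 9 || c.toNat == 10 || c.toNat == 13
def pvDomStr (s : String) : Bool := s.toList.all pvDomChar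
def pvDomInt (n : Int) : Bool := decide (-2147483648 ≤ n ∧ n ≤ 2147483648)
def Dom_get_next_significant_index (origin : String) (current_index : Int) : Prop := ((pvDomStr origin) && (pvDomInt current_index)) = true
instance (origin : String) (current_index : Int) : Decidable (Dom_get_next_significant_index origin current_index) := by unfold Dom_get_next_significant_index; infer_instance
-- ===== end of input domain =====

-- ===== PORT A =====
-- B replaces A's backward scan + backspace counter by a forward surviving-index stack (idiomatic rewrite, same O(n) cost).
-- Equivalence is claimed for current_index ≤ len(origin); beyond that both Pythons raise IndexError.

-- A's loop 'for i in range(current_index-1, -1, -1)': i runs k-1, …, 0; parameter k = number of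
-- remaining iterations (current_index.toNat, which is 0 exactly when the Python range is empty).
def pvALoop (cs : List Char) : Nat → Nat → Int
  | 0, _ => -1
  | k+1, b =>
    match PySem.List.pyGet? cs (k : Int) with
    | none => 0  -- unreachable under Pre_ (Python raises IndexError here)
    | some c =>
      if c == '#' then pvALoop cs k (b+1)
      else if b > 0 then pvALoop cs k (b-1)
      else (k : Int)

def get_next_significant_index (origin : String) (current_index : Int) : Int :=
  if current_index == 0 then -1
  else pvALoop origin.toList current_index.toNat 0

-- ===== PORT B =====
-- one iteration of B's forward loop body over index i
def pvBStep (cs : List Char) (st : List Int) (i : Nat) : List Int :=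
  match PySem.List.pyGet? cs (i : Int) with
  | none => st  -- unreachable under Pre_ (Python raises IndexError here)
  | some c =>
    if c == '#' then (if st.isEmpty then st else st.dropLast)
    else st ++ [(i : Int)]

-- 'for i in range(current_index)': i = 0, …, current_index-1, i.e. List.range current_index.toNat
def get_next_significant_index_alt (origin : String) (current_index : Int) : Int :=
  let stack := (List.range current_index.toNat).foldl (pvBStep origin.toList) []
  (stack.getLast?).getD (-1)

-- ===== PRECONDITION & SPEC =====
-- Pre_ excludes current_index > len(origin), where both A and B raise IndexError.
def Pre_get_next_significant_index (origin : String) (current_index : Int) : Prop :=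
  current_index ≤ (origin.toList.length : Int)
instance (origin : String) (current_index : Int) : Decidable (Pre_get_next_significant_index origin current_index) := by unfold Pre_get_next_significant_index; infer_instance

def pvWitness_get_next_significant_index : String × Int := ("ab#c", 4)

def Spec_get_next_significant_index (origin : String) (current_index : Int) (out : Int) : Prop := out = get_next_significant_index_alt origin current_index
instance (origin : String) (current_index : Int) (out : Int) : Decidable (Spec_get_next_significant_index origin current_index out) := by unfold Spec_get_next_significant_index; infer_instance

-- ===== CLAIM (what is proved, stated in full; the proofs are below) =====
def Claim_equal_get_next_significant_index : Prop := ∀ (origin : String) (current_index : Int), Dom_get_next_significant_index origin current_index → Pre_get_next_significant_index origin current_index → Spec_get_next_significant_index origin current_index (get_next_significant_index origin current_index)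

-- ===== LEMMAS AND PROOFS =====

-- the value A reports when b further pops are still pending on stack st
def pvG (st : List Int) (b : Nat) : Int := ((List.dropLast)^[b] st).getLast?.getD (-1)

theorem pvG_nil (b : Nat) : pvG [] b = -1 := by
  induction b with
  | zero => rfl
  | succ b ih => simpa [pvG, Function.iterate_succ_apply] using ih

theorem pvG_dropLast (st : List Int) (b : Nat) : pvG st.dropLast b = pvG st (b+1) := by
  simp [pvG, Function.iterate_succ_apply]

theorem pvG_concat_succ (st : List Int) (i : Int) (b : Nat) :
    pvG (st ++ [i]) (b+1) = pvG st b := by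
  rw [← pvG_dropLast]; simp

theorem pvG_concat_zero (st : List Int) (i : Int) : pvG (st ++ [i]) 0 = i := by
  simp [pvG]

theorem pvBStep_hash_eq (st : List Int) :
    (if st.isEmpty then st else st.dropLast) = st.dropLast := by
  cases st <;> simp

theorem pvMain (cs : List Char) (k : Nat) (hk : k ≤ cs.length) (b : Nat) :
    pvALoop cs k b = pvG ((List.range k).foldl (pvBStep cs) []) b := by
  induction k generalizing b with
  | zero => simp [pvALoop, pvG_nil]
  | succ k ih =>
    have hk' : k < cs.length := hk
    have hget : PySem.List.pyGet? cs (k : Int) = some cs[k] := by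
      simp [PySem.List.pyGet?_natCast, hk']
    rw [List.range_succ, List.foldl_append]
    simp only [List.foldl_cons, List.foldl_nil]
    rw [pvALoop, pvBStep, hget]
    dsimp only
    by_cases hc : cs[k] == '#'
    · rw [if_pos hc, if_pos hc, pvBStep_hash_eq, pvG_dropLast]
      exact ih (Nat.le_of_succ_le hk) (b+1)
    · rw [if_neg hc, if_neg hc]
      cases b with
      | zero => rw [if_neg (by omega), pvG_concat_zero]
      | succ b' =>
        rw [if_pos (by omega), Nat.succ_sub_one, pvG_concat_succ]
        exact ih (Nat.le_of_succ_le hk) b'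

-- ===== VERDICT (by name: the statement is the Claim_ definition above) =====
theorem get_next_significant_index_spec : Claim_equal_get_next_significant_index := by
  intro origin ci _ hpre
  unfold Spec_get_next_significant_index
  unfold get_next_significant_index get_next_significant_index_alt
  by_cases h0 : ci = 0
  · subst h0; simp
  · have hk : ci.toNat ≤ origin.toList.length := by
      unfold Pre_get_next_significant_index at hpre; omega
    simp only [beq_iff_eq, h0, if_false]
    rw [pvMain origin.toList ci.toNat hk 0]
    rfl
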